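-- pv_equiv track=rewrite | github.com/laquabe/OneNet | pointwise_process/category_decode.py | classifer
-- ===== SOURCE A (Python) =====
-- category_list = ['General reference','Culture and the arts','Geography and places','Health and fitness', 'History and events', 'Human activities', 'Mathematics and logic', 'Natural and physical sciences', 'People and self', 'Philosophy and thinking', 'Religion and belief systems', 'Society and social sciences', 'Technology and applied sciences']
--
-- def classifer(llm_ans:str):
--     llm_ans = llm_ans.lower()
--     hit_cat_dict = {}
--     for category in category_list:
--         category = category.lower()
--         if category in llm_ans:
--             pos = llm_ans.find(category)
--             hit_cat_dict[category] = pos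
--     if len(hit_cat_dict) > 0:
--         category, _ = sorted(hit_cat_dict.items(), key = lambda kv:(kv[1], kv[0]))[0]
--     else:
--         category = 'Any'
--     return category
-- ===== SOURCE B (Python) =====
-- category_list = ['General reference','Culture and the arts','Geography and places','Health and fitness', 'History and events', 'Human activities', 'Mathematics and logic', 'Natural and physical sciences', 'People and self', 'Philosophy and thinking', 'Religion and belief systems', 'Society and social sciences', 'Technology and applied sciences']
--
-- def classifer(llm_ans: str):
--     llm_ans = llm_ans.lower()
--     best = None  # (name, pos) of the earliest (then alphabetically smallest) hit
--     for category in category_list: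
--         c = category.lower()
--         pos = llm_ans.find(c)
--         if pos >= 0:
--             if best is None or pos < best[1] or (pos == best[1] and c < best[0]):
--                 best = (c, pos)
--     return best[0] if best is not None else 'Any'
-- ===== Notes on version B (the rewrite author's own statement) =====
-- stated objective: simpler
-- what changed: Replaced A's build-a-dict-of-hit-positions-then-stable-sort-and-take-first with a single pass keeping a running best (name, position) under the (position, name) order, keeping A's fallback string when nothing matches; no dict and no sort.
import Mathlib
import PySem

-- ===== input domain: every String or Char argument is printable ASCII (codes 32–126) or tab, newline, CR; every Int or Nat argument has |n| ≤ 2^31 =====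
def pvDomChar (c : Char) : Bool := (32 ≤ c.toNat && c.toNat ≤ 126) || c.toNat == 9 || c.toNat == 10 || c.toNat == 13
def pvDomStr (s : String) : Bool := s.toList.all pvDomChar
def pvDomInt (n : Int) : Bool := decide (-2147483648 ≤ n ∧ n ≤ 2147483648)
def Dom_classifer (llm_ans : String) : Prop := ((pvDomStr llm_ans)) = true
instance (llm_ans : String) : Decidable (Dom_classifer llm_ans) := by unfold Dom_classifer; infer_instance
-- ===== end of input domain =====

-- B replaces A's dict-of-positions + stable sort + take-first by one pass keeping a running best hit (simpler).

def categoryList : List String := ["General reference", "Culture and the arts", "Geography and places", "Health and fitness", "History and events", "Human activities", "Mathematics and logic", "Natural and physical sciences", "People and self", "Philosophy and thinking", "Religion and belief systems", "Society and social sciences", "Technology and applied sciences"]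

-- ===== PORT A =====
def classifer (llm_ans : String) : String :=
  let low := PySem.Str.lower llm_ans
  let hit_cat_dict : PySem.Dict String Int :=
    categoryList.foldl (fun d category =>
      let c := PySem.Str.lower category
      if PySem.Str.isIn c low then d.insert c (PySem.Str.find low c) else d)
      PySem.Dict.empty
  if hit_cat_dict.items.length > 0 then
    match PySem.List.sorted2 hit_cat_dict.items (fun kv => kv.2) (fun kv => kv.1) with
    | kv :: _ => kv.1
    | [] => ""   -- unreachable: the dict was tested nonempty
  else "Any"

-- ===== PORT B =====
def classifer_alt (llm_ans : String) : String :=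
  let low := PySem.Str.lower llm_ans
  let best : Option (String × Int) :=
    categoryList.foldl (fun best category =>
      let c := PySem.Str.lower category
      let pos := PySem.Str.find low c
      if 0 ≤ pos then
        match best with
        | none => some (c, pos)
        | some (bn, bp) => if pos < bp ∨ (pos = bp ∧ c < bn) then some (c, pos) else best
      else best) none
  match best with
  | some (bn, _) => bn
  | none => "Any"

-- ===== PRECONDITION & SPEC =====
def Spec_classifer (llm_ans : String) (out : String) : Prop := out = classifer_alt llm_ans
instance (llm_ans : String) (out : String) : Decidable (Spec_classifer llm_ans out) := by unfold Spec_classifer; infer_instance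

-- ===== CLAIM (what is proved, stated in full; the proofs are below) =====
def Claim_equal_classifer : Prop := ∀ (llm_ans : String), Dom_classifer llm_ans → Spec_classifer llm_ans (classifer llm_ans)

-- ===== LEMMAS AND PROOFS =====

-- the (position, name) sort key, as one lexicographic key
def pvKey (kv : String × Int) : Lex (Int × String) := toLex (kv.2, kv.1)

-- B's running-best update, on a (name, pos) pair known to be a hit
def pvStep (acc : Option (String × Int)) (kv : String × Int) : Option (String × Int) :=
  match acc with
  | none => some kv
  | some (bn, bp) => if kv.2 < bp ∨ (kv.2 = bp ∧ kv.1 < bn) then some kv else some (bn, bp)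

theorem pvKey_injective : Function.Injective pvKey := by
  intro a b h
  have := toLex.injective h
  have h1 : a.2 = b.2 := congrArg Prod.fst this
  have h2 : a.1 = b.1 := congrArg Prod.snd this
  exact Prod.ext h2 h1

theorem pvStep_cond (kv bn bp) :
    (kv.2 < bp ∨ (kv.2 = bp ∧ kv.1 < bn)) ↔ pvKey kv < pvKey (bn, bp) := by
  simp [pvKey, Prod.Lex.lt_iff]

theorem sorted2_eq_sorted_lex (l : List (String × Int)) :
    PySem.List.sorted2 l (fun kv => kv.2) (fun kv => kv.1) = PySem.List.sorted l pvKey := by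
  have hbe : (fun (a b : String × Int) => decide (a.2 < b.2) || (!decide (b.2 < a.2) && decide (a.1 < b.1))) =
      (fun a b => decide (pvKey a < pvKey b)) := by
    funext a b
    rw [Bool.eq_iff_iff]
    simp only [Bool.or_eq_true, Bool.and_eq_true, Bool.not_eq_true', decide_eq_true_eq,
      decide_eq_false_iff_not, pvKey, Prod.Lex.lt_iff, ofLex_toLex]
    constructor
    · rintro (h | ⟨h1, h2⟩)
      · exact Or.inl h
      · rcases lt_or_ge a.2 b.2 with hl | hge
        · exact Or.inl hl
        · exact Or.inr ⟨le_antisymm (not_lt.mp h1) hge, h2⟩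
    · rintro (h | ⟨h1, h2⟩)
      · exact Or.inl h
      · exact Or.inr ⟨by rw [h1]; exact lt_irrefl _, h2⟩
  simp only [PySem.List.sorted2, PySem.List.sorted, Bool.false_eq_true, if_false, hbe]

theorem pvFold_min (t : List (String × Int)) : ∀ b : String × Int,
    ∃ r, t.foldl pvStep (some b) = some r ∧ r ∈ b :: t ∧
      ∀ y ∈ b :: t, pvKey r ≤ pvKey y := by
  induction t with
  | nil =>
    intro b
    refine ⟨b, rfl, List.mem_cons_self, ?_⟩
    intro y hy
    rcases List.mem_cons.mp hy with rfl | h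
    · exact le_refl _
    · cases h
  | cons x t ih =>
    intro b
    have hstep : pvStep (some b) x = some (if pvKey x < pvKey b then x else b) := by
      rcases b with ⟨bn, bp⟩
      simp only [pvStep]
      rw [if_congr (pvStep_cond x bn bp) rfl rfl]
      split <;> rfl
    obtain ⟨r, hr, hmem, hmin⟩ := ih (if pvKey x < pvKey b then x else b)
    have hacc_le_b : pvKey (if pvKey x < pvKey b then x else b) ≤ pvKey b := by
      split
    -- acc' ≤ b
      · exact le_of_lt ‹_›
      · exact le_refl _
    have hacc_le_x : pvKey (if pvKey x < pvKey b then x else b) ≤ pvKey x := by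
      split
      · exact le_refl _
      · exact le_of_not_gt ‹_›
    refine ⟨r, ?_, ?_, ?_⟩
    · simpa [hstep] using hr
    · rcases List.mem_cons.mp hmem with heq | h
      · rw [heq]
        split <;> simp
      · simp [h]
    · intro y hy
      rcases List.mem_cons.mp hy with rfl | hy
      · exact le_trans (hmin _ List.mem_cons_self) hacc_le_b
      rcases List.mem_cons.mp hy with rfl | hy
      · exact le_trans (hmin _ List.mem_cons_self) hacc_le_x
      · exact hmin y (List.mem_cons_of_mem _ hy)

-- the list of hits (lowered name, position) in category-list order, as both programs produce it
theorem hits_classifer (low : String) :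
    (categoryList.foldl (fun d category =>
        if PySem.Str.isIn (PySem.Str.lower category) low then
          d.insert (PySem.Str.lower category) (PySem.Str.find low (PySem.Str.lower category))
        else d)
      PySem.Dict.empty).items =
    ((categoryList.filter (fun cat => PySem.Str.isIn (PySem.Str.lower cat) low)).map
      (fun cat => (PySem.Str.lower cat, PySem.Str.find low (PySem.Str.lower cat)))) := by
  have h1 : (categoryList.foldl (fun d category =>
        if PySem.Str.isIn (PySem.Str.lower category) low then
          d.insert (PySem.Str.lower category) (PySem.Str.find low (PySem.Str.lower category))
        else d)
      PySem.Dict.empty) =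
      (categoryList.filter (fun cat => PySem.Str.isIn (PySem.Str.lower cat) low)).foldl
        (fun d cat => d.insert (PySem.Str.lower cat) (PySem.Str.find low (PySem.Str.lower cat)))
        PySem.Dict.empty :=
    PySem.List.foldl_if_eq_foldl_filter
      (p := fun cat => PySem.Str.isIn (PySem.Str.lower cat) low)
      (f := fun d cat => d.insert (PySem.Str.lower cat) (PySem.Str.find low (PySem.Str.lower cat)))
      categoryList PySem.Dict.empty
  have hnd : ((categoryList.filter (fun cat => PySem.Str.isIn (PySem.Str.lower cat) low)).map
      PySem.Str.lower).Nodup := by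
    have hall : (categoryList.map PySem.Str.lower).Nodup := by decide
    exact (List.filter_sublist.map PySem.Str.lower).nodup hall
  rw [h1, PySem.Dict.items_foldl_insert_fresh _ _ _ _ (fun a _ => PySem.Dict.contains_empty _) hnd]
  rfl

theorem pvFilter_eq (low : String) :
    categoryList.filter (fun cat => decide (0 ≤ PySem.Str.find low (PySem.Str.lower cat))) =
    categoryList.filter (fun cat => PySem.Str.isIn (PySem.Str.lower cat) low) := by
  apply List.filter_congr
  intro cat _
  rw [Bool.eq_iff_iff]
  simp [PySem.Chars.find_nonneg_iff, PySem.Chars.isIn_iff_infix]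

theorem classifer_eq_alt (s : String) : classifer s = classifer_alt s := by
  show (if ((categoryList.foldl (fun d category =>
          if PySem.Str.isIn (PySem.Str.lower category) (PySem.Str.lower s) then
            d.insert (PySem.Str.lower category)
              (PySem.Str.find (PySem.Str.lower s) (PySem.Str.lower category))
          else d)
        PySem.Dict.empty).items).length > 0 then
      match PySem.List.sorted2 ((categoryList.foldl (fun d category =>
          if PySem.Str.isIn (PySem.Str.lower category) (PySem.Str.lower s) then
            d.insert (PySem.Str.lower category)
              (PySem.Str.find (PySem.Str.lower s) (PySem.Str.lower category))
          else d)
        PySem.Dict.empty).items) (fun kv => kv.2) (fun kv => kv.1) with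
      | kv :: _ => kv.1
      | [] => ""
    else "Any") =
    (match categoryList.foldl (fun best category =>
        if 0 ≤ PySem.Str.find (PySem.Str.lower s) (PySem.Str.lower category) then
          match best with
          | none => some (PySem.Str.lower category,
              PySem.Str.find (PySem.Str.lower s) (PySem.Str.lower category))
          | some (bn, bp) =>
            if PySem.Str.find (PySem.Str.lower s) (PySem.Str.lower category) < bp ∨
                (PySem.Str.find (PySem.Str.lower s) (PySem.Str.lower category) = bp ∧
                  PySem.Str.lower category < bn) then
              some (PySem.Str.lower category,
                PySem.Str.find (PySem.Str.lower s) (PySem.Str.lower category))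
            else best
        else best) none with
    | some (bn, _) => bn
    | none => "Any")
  set low := PySem.Str.lower s with hlow
  have hbodyB : (fun (best : Option (String × Int)) (category : String) =>
      if 0 ≤ PySem.Str.find low (PySem.Str.lower category) then
        match best with
        | none => some (PySem.Str.lower category, PySem.Str.find low (PySem.Str.lower category))
        | some (bn, bp) =>
          if PySem.Str.find low (PySem.Str.lower category) < bp ∨
              (PySem.Str.find low (PySem.Str.lower category) = bp ∧ PySem.Str.lower category < bn) then
            some (PySem.Str.lower category, PySem.Str.find low (PySem.Str.lower category))
          else best
      else best) =
      (fun best category =>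
        if 0 ≤ PySem.Str.find low (PySem.Str.lower category) then
          pvStep best (PySem.Str.lower category, PySem.Str.find low (PySem.Str.lower category))
        else best) := by
    funext best category
    rcases best with _ | ⟨bn, bp⟩ <;> simp [pvStep]
  have h2 : categoryList.foldl (fun best category =>
        if 0 ≤ PySem.Str.find low (PySem.Str.lower category) then
          pvStep best (PySem.Str.lower category, PySem.Str.find low (PySem.Str.lower category))
        else best) none =
      (categoryList.filter (fun cat => decide (0 ≤ PySem.Str.find low (PySem.Str.lower cat)))).foldl
        (fun best cat => pvStep best (PySem.Str.lower cat, PySem.Str.find low (PySem.Str.lower cat)))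
        none :=
    PySem.List.foldl_ite_eq_foldl_filter
      (p := fun cat => 0 ≤ PySem.Str.find low (PySem.Str.lower cat))
      (f := fun best cat => pvStep best (PySem.Str.lower cat, PySem.Str.find low (PySem.Str.lower cat)))
      categoryList none
  rw [hits_classifer low, hbodyB, h2, pvFilter_eq low, ← List.foldl_map
      (f := fun cat => (PySem.Str.lower cat, PySem.Str.find low (PySem.Str.lower cat)))
      (g := pvStep)]
  set H := ((categoryList.filter (fun cat => PySem.Str.isIn (PySem.Str.lower cat) low)).map
    (fun cat => (PySem.Str.lower cat, PySem.Str.find low (PySem.Str.lower cat)))) with hH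
  clear_value H
  rcases H with _ | ⟨x, t⟩
  · rfl
  · simp only [List.length_cons, List.foldl_cons, sorted2_eq_sorted_lex]
    have hpos : 0 < t.length + 1 := Nat.succ_pos _
    rw [if_pos hpos]
    obtain ⟨r, hr, hmemr, hminr⟩ := pvFold_min t x
    have hstep0 : pvStep none x = some x := rfl
    rw [hstep0, hr]
    rcases hs : PySem.List.sorted (x :: t) pvKey with _ | ⟨m, tt⟩
    · exact absurd ((PySem.List.sorted_eq_nil_iff _ _ _).mp hs) (by simp)
    · have hmmem : m ∈ x :: t := (PySem.List.mem_sorted _ _ _ _).mp (hs ▸ List.mem_cons_self)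
      have hmmin : ∀ y ∈ x :: t, pvKey m ≤ pvKey y := PySem.List.key_head_sorted_le _ _ hs
      have hrmem : r ∈ x :: t := hmemr
      have hmr : m = r := by
        apply pvKey_injective
        apply le_antisymm (hmmin r hrmem)
        exact hminr m hmmem
      rw [hmr]

-- ===== VERDICT (by name: the statement is the Claim_ definition above) =====
theorem classifer_spec : Claim_equal_classifer := by
  intro llm_ans _
  unfold Spec_classifer
  exact classifer_eq_alt llm_ans
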